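-- pv_equiv track=rewrite | github.com/Suprabhash/Quant | Research/RL/Deprecated/OG_to_be_deleted.py | get_all_states
-- ===== SOURCE A (Python) =====
-- import itertools
--
-- def get_all_states(price_states_value,  fisher_states_value):  #, max_num_units   #price_roc_states_value,
--     states = []
--     # for units in range(max_num_units - 10, max_num_units + 9):
--     for p, _ in price_states_value.items():
--         # for proc, _ in price_roc_states_value.items():
--         fisher_states = []
--         for i in range(len(fisher_states_value)):
--             fisher_states.append(list(fisher_states_value[i].items()))
--         fisher_states = list(itertools.product(*fisher_states))
--         for fs in fisher_states:
--             fisher_state = ''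
--             for f in fs:
--                 c, _ = f
--                 fisher_state =  fisher_state + str(c)
--             states.append(str(p)+fisher_state)  #str(units)+     #+str(proc)
--     return states
-- ===== SOURCE B (Python) =====
-- def get_all_states(price_states_value, fisher_states_value):
--     # Mixed-radix rank decoding: the k-th output string is obtained by decoding k
--     # into digits (one per axis, last axis fastest) with mod/div arithmetic.
--     axes = [list(price_states_value.keys())]
--     for d in fisher_states_value:
--         axes.append(list(d.keys()))
--     total = 1
--     for a in axes:
--         total *= len(a)
--     out = []
--     for j in range(total):
--         s = ''
--         r = j
--         for a in reversed(axes):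
--             s = str(a[r % len(a)]) + s
--             r //= len(a)
--         out.append(s)
--     return out
-- ===== Notes on version B (the rewrite author's own statement) =====
-- stated objective: alternative
-- what changed: B replaces the nested cartesian-product enumeration (itertools.product tuples rebuilt per price state and joined) by mixed-radix rank decoding: it computes the total count of states and, in a single loop over range(total), decodes each index into one key per axis with mod/floordiv arithmetic, building the string back-to-front.
import Mathlib
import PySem

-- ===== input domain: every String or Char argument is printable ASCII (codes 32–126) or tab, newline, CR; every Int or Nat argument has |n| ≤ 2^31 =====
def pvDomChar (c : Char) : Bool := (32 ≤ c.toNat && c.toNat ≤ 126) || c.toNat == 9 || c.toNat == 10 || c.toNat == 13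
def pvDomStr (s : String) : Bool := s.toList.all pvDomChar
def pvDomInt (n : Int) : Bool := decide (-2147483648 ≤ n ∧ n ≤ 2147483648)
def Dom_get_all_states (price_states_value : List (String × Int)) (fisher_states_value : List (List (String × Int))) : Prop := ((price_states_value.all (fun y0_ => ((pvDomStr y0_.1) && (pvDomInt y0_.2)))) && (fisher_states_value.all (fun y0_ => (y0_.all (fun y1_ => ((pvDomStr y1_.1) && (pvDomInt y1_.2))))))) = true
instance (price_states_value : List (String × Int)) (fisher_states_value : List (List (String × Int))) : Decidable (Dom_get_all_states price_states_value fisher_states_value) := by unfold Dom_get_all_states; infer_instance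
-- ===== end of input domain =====

-- B replaces A's per-price-state itertools.product enumeration by mixed-radix rank
-- decoding: one loop over range(total) decodes each index into one key per axis with
-- mod/floordiv arithmetic (objective: alternative algorithm, identical output order).

-- ===== PORT A =====
-- itertools.product over a list of lists, first axis varying slowest
def pyProdA (ls : List (List (String × Int))) : List (List (String × Int)) :=
  match ls with
  | [] => [[]]
  | l :: rest => l.flatMap (fun x => (pyProdA rest).map (x :: ·))

def get_all_states (price_states_value : List (String × Int)) (fisher_states_value : List (List (String × Int))) : List String :=
  price_states_value.foldl (fun states p =>
    let fisher_states := (PySem.List.pyRange 0 (fisher_states_value.length : Int) 1).foldl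
      (fun acc i => acc ++ [PySem.List.pyGetD fisher_states_value i []]) []
    let prods := pyProdA fisher_states
    prods.foldl (fun st t =>
      st ++ [p.1 ++ t.foldl (fun acc c => acc ++ c.1) ""]) states) []

-- ===== PORT B =====
def get_all_states_alt (price_states_value : List (String × Int)) (fisher_states_value : List (List (String × Int))) : List String :=
  let axes := fisher_states_value.foldl (fun acc d => acc ++ [d.map (·.1)])
    [price_states_value.map (·.1)]
  let total := axes.foldl (fun t a => t * (a.length : Int)) 1
  (PySem.List.pyRange 0 total 1).foldl (fun out j =>
    let sr := axes.reverse.foldl (fun (sr : String × Int) a =>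
      (PySem.List.pyGetD a (PySem.Int.mod sr.2 (a.length : Int)) "" ++ sr.1,
       PySem.Int.floordiv sr.2 (a.length : Int))) ("", j)
    out ++ [sr.1]) []

-- ===== PRECONDITION & SPEC =====
def Spec_get_all_states (price_states_value : List (String × Int)) (fisher_states_value : List (List (String × Int))) (out : List String) : Prop := out = get_all_states_alt price_states_value fisher_states_value
instance (price_states_value : List (String × Int)) (fisher_states_value : List (List (String × Int))) (out : List String) : Decidable (Spec_get_all_states price_states_value fisher_states_value out) := by unfold Spec_get_all_states; infer_instance

-- ===== CLAIM (what is proved, stated in full; the proofs are below) =====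
def Claim_equal_get_all_states : Prop := ∀ (price_states_value : List (String × Int)) (fisher_states_value : List (List (String × Int))), Dom_get_all_states price_states_value fisher_states_value → Spec_get_all_states price_states_value fisher_states_value (get_all_states price_states_value fisher_states_value)

-- ===== LEMMAS AND PROOFS =====

-- reference form: cartesian product of key lists, as concatenated strings
def prodStr : List (List String) → List String
  | [] => [""]
  | a :: r => a.flatMap (fun x => (prodStr r).map (x ++ ·))

-- mixed-radix decode of rank r along axes L (L is the reversed axis list, as in B's inner loop)
def decS : List (List String) → Nat → String
  | [], _ => ""
  | a :: L, r => decS L (r / a.length) ++ a.getD (r % a.length) ""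

def axP (L : List (List String)) : Nat := (L.map List.length).prod

def axK (fs : List (List (String × Int))) : List (List String) := fs.map (·.map (·.1))

theorem axP_cons (a : List String) (L : List (List String)) :
    axP (a :: L) = a.length * axP L := by simp [axP]

theorem map_getD_range (L : List String) (d : String) :
    (List.range L.length).map (fun i => L.getD i d) = L := by
  apply List.ext_getElem (by simp)
  intro i h1 h2
  simp [List.getD_eq_getElem?_getD, List.getElem?_eq_getElem h2]

theorem decS_append (L : List (List String)) (a : List String) (r : Nat) :
    decS (L ++ [a]) r = a.getD ((r / axP L) % a.length) "" ++ decS L r := by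
  induction L generalizing r with
  | nil => simp [decS, axP]
  | cons b L ih =>
    rw [axP_cons]
    simp only [List.cons_append, decS, ih (r / b.length)]
    rw [Nat.div_div_eq_div_mul, String.append_assoc, mul_comm b.length (axP L)]

theorem decS_period (L : List (List String)) (r q : Nat) :
    decS L (r + q * axP L) = decS L r := by
  induction L generalizing r with
  | nil => simp [decS]
  | cons a L ih =>
    rw [axP_cons]
    by_cases h : a.length = 0
    · simp [h]
    · have hpos : 0 < a.length := Nat.pos_of_ne_zero h
      have h1 : (r + q * (a.length * axP L)) % a.length = r % a.length := by
        rw [show q * (a.length * axP L) = a.length * (q * axP L) by ring, Nat.add_mul_mod_self_left]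
      have h2 : (r + q * (a.length * axP L)) / a.length = r / a.length + q * axP L := by
        rw [show q * (a.length * axP L) = a.length * (q * axP L) by ring,
          Nat.add_mul_div_left _ _ hpos]
      simp only [decS]
      rw [h1, h2, ih]

theorem rangeProd (n m : Nat) (f : Nat → String) :
    (List.range (n * m)).map f
      = (List.range n).flatMap (fun q => (List.range m).map (fun b => f (q * m + b))) := by
  induction n with
  | zero => simp
  | succ n ih =>
    rw [Nat.succ_mul, List.range_add, List.map_append, ih, List.range_succ, List.flatMap_append]
    simp [List.map_map, Function.comp_def]

theorem prodStr_of_zero (K : List (List String)) (h : axP K = 0) : prodStr K = [] := by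
  induction K with
  | nil => simp [axP] at h
  | cons a K ih =>
    rw [axP_cons, Nat.mul_eq_zero] at h
    rcases h with h | h
    · rw [List.length_eq_zero_iff] at h; simp [prodStr, h]
    · simp [prodStr, ih h, List.flatMap_eq_nil_iff]

-- the decoded ranks 0, …, total-1 enumerate exactly the cartesian product, in product order
theorem decS_main (K : List (List String)) :
    (List.range (axP K)).map (fun j => decS K.reverse j) = prodStr K := by
  induction K with
  | nil => simp [axP, decS, prodStr]
  | cons a K ih =>
    rw [axP_cons]
    by_cases hP : axP K = 0
    · rw [hP, Nat.mul_zero]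
      simp [prodStr, prodStr_of_zero K hP, List.flatMap_eq_nil_iff]
    have hpos : 0 < axP K := Nat.pos_of_ne_zero hP
    have hrev : axP K.reverse = axP K := by simp [axP, List.map_reverse]
    have step : ∀ q < a.length, ∀ b < axP K,
        decS (a :: K).reverse (q * axP K + b)
          = a.getD q "" ++ decS K.reverse b := by
      intro q hq b hb
      rw [List.reverse_cons, decS_append, hrev]
      have e1 : (q * axP K + b) / axP K % a.length = q := by
        rw [Nat.add_comm, mul_comm q, Nat.add_mul_div_left _ _ hpos,
          Nat.div_eq_of_lt hb, Nat.zero_add, Nat.mod_eq_of_lt hq]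
      have e2 : decS K.reverse (q * axP K + b) = decS K.reverse b := by
        have := decS_period K.reverse b q
        rw [hrev] at this
        rw [Nat.add_comm (q * axP K) b, this]
      rw [e1, e2]
    rw [rangeProd]
    have inner : ∀ q < a.length,
        (List.range (axP K)).map (fun b => decS (a :: K).reverse (q * axP K + b))
          = (prodStr K).map (fun s => a.getD q "" ++ s) := by
      intro q hq
      rw [← ih, List.map_map]
      apply List.map_congr_left
      intro b hb
      rw [List.mem_range] at hb
      simpa using step q hq b hb
    rw [show prodStr (a :: K) = a.flatMap (fun x => (prodStr K).map (x ++ ·)) from rfl]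
    conv_rhs => rw [← map_getD_range a "", List.flatMap_map]
    simp only [List.flatMap_def]
    congr 1
    apply List.map_congr_left
    intro q hq
    rw [List.mem_range] at hq
    exact inner q hq

-- A's index loop rebuilds the list of fisher item-lists; it is the list itself.
theorem range_rebuild (fs : List (List (String × Int))) :
    (PySem.List.pyRange 0 (fs.length : Int) 1).foldl
      (fun acc i => acc ++ [PySem.List.pyGetD fs i []]) [] = fs := by
  have h := PySem.List.foldl_pyRange_pyGetD' (xs := fs) (a := 0)
    (d := ([] : List (String × Int))) (init := ([] : List (List (String × Int))))
    (f := fun acc x => acc ++ [x]) (by norm_num)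
  rw [h]
  simpa using PySem.List.foldl_append_singleton_eq_map (l := fs) (f := id)
    (acc := ([] : List (List (String × Int))))

theorem strOf_shift (t : List (String × Int)) (s : String) :
    t.foldl (fun acc c => acc ++ c.1) s = s ++ t.foldl (fun acc c => acc ++ c.1) "" := by
  induction t generalizing s with
  | nil => simp
  | cons x t ih =>
    simp only [List.foldl_cons]
    rw [ih (s ++ x.1), ih ("" ++ x.1), String.append_assoc]
    simp

theorem strOf_cons (x : String × Int) (t : List (String × Int)) :
    (x :: t).foldl (fun acc c => acc ++ c.1) "" = x.1 ++ t.foldl (fun acc c => acc ++ c.1) "" := by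
  simp only [List.foldl_cons]
  rw [strOf_shift]
  simp

-- joining A's product tuples gives the product of the key lists
theorem prodA_join (L : List (List (String × Int))) :
    (pyProdA L).map (fun t => t.foldl (fun acc c => acc ++ c.1) "") = prodStr (axK L) := by
  induction L with
  | nil => simp [pyProdA, axK, prodStr]
  | cons l rest ih =>
    rw [pyProdA, List.map_flatMap]
    rw [show axK (l :: rest) = (l.map (·.1)) :: axK rest from rfl, prodStr, List.flatMap_map]
    apply List.flatMap_congr
    intro x _
    rw [List.map_map, ← ih, List.map_map]
    apply List.map_congr_left
    intro t _
    simpa [Function.comp] using strOf_cons x t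

-- A reduced to the reference form
theorem A_flat (ps : List (String × Int)) (fs : List (List (String × Int))) :
    get_all_states ps fs
      = ps.flatMap (fun p => (prodStr (axK fs)).map (p.1 ++ ·)) := by
  unfold get_all_states
  simp only [range_rebuild]
  simp only [PySem.List.foldl_append_singleton_eq_map, PySem.List.foldl_append_eq_flatMap]
  rw [List.nil_append]
  apply List.flatMap_congr
  intro p _
  rw [← prodA_join, List.map_map]
  rfl

theorem foldl_mul_len (L : List (List String)) (t : Int) :
    L.foldl (fun t a => t * (a.length : Int)) t = t * (axP L : Int) := by
  induction L generalizing t with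
  | nil => simp [axP]
  | cons a L ih =>
    rw [List.foldl_cons, ih, axP_cons]
    push_cast
    ring

-- B's inner loop is decS plus the running quotient
theorem fold_dec (L : List (List String)) (k : Nat) (s : String) :
    L.foldl (fun (sr : String × Int) a =>
        (PySem.List.pyGetD a (PySem.Int.mod sr.2 (a.length : Int)) "" ++ sr.1,
         PySem.Int.floordiv sr.2 (a.length : Int))) (s, (k : Int))
      = (decS L k ++ s, ((k / axP L : Nat) : Int)) := by
  induction L generalizing k s with
  | nil => simp [decS, axP]
  | cons a L ih =>
    rw [List.foldl_cons]
    simp only [PySem.Int.mod_natCast, PySem.Int.floordiv_natCast, PySem.List.pyGetD_natCast]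
    rw [ih (k / a.length)]
    rw [show decS (a :: L) k = decS L (k / a.length) ++ a.getD (k % a.length) "" from rfl]
    rw [Nat.div_div_eq_div_mul, axP_cons, String.append_assoc]

-- B reduced to the reference form
theorem B_flat (ps : List (String × Int)) (fs : List (List (String × Int))) :
    get_all_states_alt ps fs
      = ps.flatMap (fun p => (prodStr (axK fs)).map (p.1 ++ ·)) := by
  unfold get_all_states_alt
  dsimp only
  simp only [PySem.List.foldl_append_singleton_eq_map, List.singleton_append]
  rw [List.nil_append]
  rw [show (List.map (List.map fun x => x.1) fs : List (List String)) = axK fs from rfl]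
  rw [foldl_mul_len, one_mul, PySem.List.pyRange_zero_nat, List.map_map]
  calc _ = (List.range (axP (ps.map (·.1) :: axK fs))).map
          (fun k => decS (ps.map (·.1) :: axK fs).reverse k) := by
        apply List.map_congr_left
        intro k _
        simp only [Function.comp_apply]
        rw [fold_dec]
        simp
    _ = prodStr (ps.map (·.1) :: axK fs) := decS_main _
    _ = ps.flatMap (fun p => (prodStr (axK fs)).map (p.1 ++ ·)) := by
        rw [prodStr, List.flatMap_map]

-- ===== VERDICT (by name: the statement is the Claim_ definition above) =====
theorem get_all_states_spec : Claim_equal_get_all_states := by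
  intro ps fs _
  unfold Spec_get_all_states
  rw [A_flat, B_flat]
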